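-- pv_equiv track=rewrite | github.com/brojyf/ProteinExt3-Comparison | fasta/unique_protein.py | _build_truth_rows
-- ===== SOURCE A (Python) =====
-- def _unique_in_order(values):
--     seen = set()
--     unique_values = []
--     for value in values:
--         if value in seen:
--             continue
--         seen.add(value)
--         unique_values.append(value)
--     return unique_values
--
-- def _build_truth_rows(output_pids, truth_source_by_pid, go_aspect):
--     truth_rows = []
--     missing_aspect_terms = set()
--     missing_truth_pids = []
--
--     for protein_id in _unique_in_order(output_pids):
--         go_terms = truth_source_by_pid.get(protein_id)
--         if not go_terms:
--             missing_truth_pids.append(protein_id)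
--             continue
--
--         for go_term in go_terms:
--             aspect = go_aspect.get(go_term)
--             if aspect is None:
--                 missing_aspect_terms.add(go_term)
--                 continue
--             truth_rows.append((protein_id, go_term, aspect))
--
--     if missing_aspect_terms:
--         preview = ", ".join(sorted(missing_aspect_terms)[:10])
--         raise KeyError(f"以下 GO term 没有在 OBO 中找到 aspect: {preview}")
--
--     return truth_rows, missing_truth_pids
-- ===== SOURCE B (Python) =====
-- def _build_truth_rows(output_pids, truth_source_by_pid, go_aspect):
--     # Precompile each protein's rows and bad terms once from the truth source,
--     # independent of the requested order; then assemble by table lookup.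
--     compiled = {
--         pid: ([(pid, t, go_aspect[t]) for t in terms if t in go_aspect],
--               [t for t in terms if t not in go_aspect])
--         for pid, terms in truth_source_by_pid.items()
--         if terms
--     }
--     truth_rows = []
--     missing_truth_pids = []
--     missing_aspect_terms = set()
--     for pid in dict.fromkeys(output_pids):
--         if pid in compiled:
--             rows, bad = compiled[pid]
--             truth_rows += rows
--             missing_aspect_terms.update(bad)
--         else:
--             missing_truth_pids.append(pid)
--     if missing_aspect_terms:
--         preview = ", ".join(sorted(missing_aspect_terms)[:10])
--         raise KeyError(f"以下 GO term 没有在 OBO 中找到 aspect: {preview}")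
--     return truth_rows, missing_truth_pids
-- ===== Notes on version B (the rewrite author's own statement) =====
-- stated objective: alternative
-- what changed: A validates and builds rows term-by-term inside a nested loop over deduped output pids (with a helper seen-set dedup); B first precompiles a per-protein table of (rows, terms-without-aspect) directly from truth_source_by_pid, then assembles the result by plain table lookup over dict.fromkeys(output_pids).
import Mathlib
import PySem

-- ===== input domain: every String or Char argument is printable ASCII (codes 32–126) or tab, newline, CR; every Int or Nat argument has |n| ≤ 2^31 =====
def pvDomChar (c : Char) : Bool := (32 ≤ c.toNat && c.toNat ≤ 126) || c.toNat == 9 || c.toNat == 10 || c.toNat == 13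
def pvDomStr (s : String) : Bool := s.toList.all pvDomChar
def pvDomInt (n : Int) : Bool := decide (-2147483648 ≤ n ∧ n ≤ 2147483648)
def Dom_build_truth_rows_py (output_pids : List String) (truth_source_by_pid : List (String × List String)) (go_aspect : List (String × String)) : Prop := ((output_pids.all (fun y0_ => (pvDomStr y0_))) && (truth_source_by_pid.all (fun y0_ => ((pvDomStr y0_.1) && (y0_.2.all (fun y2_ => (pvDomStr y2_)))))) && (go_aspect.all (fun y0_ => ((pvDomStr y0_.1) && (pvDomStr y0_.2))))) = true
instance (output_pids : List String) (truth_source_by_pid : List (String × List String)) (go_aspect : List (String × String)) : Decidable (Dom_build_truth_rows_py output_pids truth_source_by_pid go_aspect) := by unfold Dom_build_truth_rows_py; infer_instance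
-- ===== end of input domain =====

-- B replaces A's per-output-pid nested validate/build loop by a precompiled per-protein table
-- (rows + bad terms computed once from the truth source) followed by a flat assembly pass over
-- dict.fromkeys(output_pids); objective: alternative decomposition (no speed claim). Equivalence
-- is about the return value on Pre_ (where a term lacks an aspect both Pythons raise KeyError).

-- ===== PORT A =====
-- _unique_in_order: fold carrying (seen : set, unique_values)
def pvUniqueInOrder (values : List String) : List String :=
  (values.foldl
    (fun (st : PySem.Set String × List String) value =>
      if PySem.Set.contains st.1 value then st
      else (PySem.Set.add st.1 value, st.2 ++ [value]))
    (PySem.Set.empty, [])).2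

-- loop body of A: state = (truth_rows, missing_aspect_terms, missing_truth_pids)
def pvStepA (tsd : PySem.Dict String (List String)) (gad : PySem.Dict String String)
    (st : List (String × String × String) × PySem.Set String × List String) (protein_id : String) :
    List (String × String × String) × PySem.Set String × List String :=
  match tsd.get? protein_id with
  | none => (st.1, st.2.1, st.2.2 ++ [protein_id])          -- go_terms is None → falsy
  | some go_terms =>
    if go_terms = [] then (st.1, st.2.1, st.2.2 ++ [protein_id])   -- empty list → falsy
    else
      let inner := go_terms.foldl
        (fun (st2 : List (String × String × String) × PySem.Set String) go_term =>
          match gad.get? go_term with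
          | none => (st2.1, PySem.Set.add st2.2 go_term)
          | some aspect => (st2.1 ++ [(protein_id, go_term, aspect)], st2.2))
        (st.1, st.2.1)
      (inner.1, inner.2, st.2.2)

def build_truth_rows_py (output_pids : List String) (truth_source_by_pid : List (String × List String)) (go_aspect : List (String × String)) : (List (String × String × String)) × List String :=
  let tsd := PySem.Dict.mk truth_source_by_pid
  let gad := PySem.Dict.mk go_aspect
  let st := (pvUniqueInOrder output_pids).foldl (pvStepA tsd gad) ([], PySem.Set.empty, [])
  -- 'if missing_aspect_terms: raise KeyError(...)' — that branch is excluded by Pre_ (A raises there)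
  (st.1, st.2.2)

-- ===== PORT B =====
-- dict-comprehension body over truth_source_by_pid.items(): entries with truthy terms only;
-- the two inner comprehensions are filter+map ('go_aspect[t]' is guarded by 't in go_aspect',
-- so getD "" is exact there)
def pvCompiledStep (gad : PySem.Dict String String)
    (d : PySem.Dict String (List (String × String × String) × List String))
    (p : String × List String) :
    PySem.Dict String (List (String × String × String) × List String) :=
  if p.2 = [] then d
  else d.insert p.1
    ((p.2.filter (fun t => gad.contains t)).map (fun t => (p.1, t, gad.getD t "")),
     p.2.filter (fun t => !(gad.contains t)))

def pvCompiled (gad : PySem.Dict String String) (tsd : PySem.Dict String (List String)) :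
    PySem.Dict String (List (String × String × String) × List String) :=
  tsd.items.foldl (pvCompiledStep gad) PySem.Dict.empty

-- assembly loop body: state = (truth_rows, missing_truth_pids, missing_aspect_terms)
def pvStepB (compiled : PySem.Dict String (List (String × String × String) × List String))
    (st : List (String × String × String) × List String × PySem.Set String) (pid : String) :
    List (String × String × String) × List String × PySem.Set String :=
  match compiled.get? pid with
  | some e => (st.1 ++ e.1, st.2.1, PySem.Set.update st.2.2 e.2)
  | none => (st.1, st.2.1 ++ [pid], st.2.2)

def build_truth_rows_py_alt (output_pids : List String) (truth_source_by_pid : List (String × List String)) (go_aspect : List (String × String)) : (List (String × String × String)) × List String :=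
  let tsd := PySem.Dict.mk truth_source_by_pid
  let gad := PySem.Dict.mk go_aspect
  let compiled := pvCompiled gad tsd
  -- dict.fromkeys(output_pids) iterates the first occurrences in order = PySem.List.dedup
  let st := (PySem.List.dedup output_pids).foldl (pvStepB compiled) ([], [], PySem.Set.empty)
  -- 'if missing_aspect_terms: raise KeyError(...)' — excluded by Pre_ (B raises there too)
  (st.1, st.2.1)

-- ===== PRECONDITION & SPEC =====
-- Pre_ excludes (a) the inputs where A raises KeyError (some unique output pid has nonempty
-- go_terms containing a term with no aspect in go_aspect; B raises the identical KeyError there),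
-- and (b) association lists for truth_source_by_pid with duplicate keys, which do not correspond
-- to any Python dict (the Python argument is a dict, whose keys are necessarily unique).
def Pre_build_truth_rows_py (output_pids : List String) (truth_source_by_pid : List (String × List String)) (go_aspect : List (String × String)) : Prop :=
  ((output_pids.all (fun pid =>
    match (PySem.Dict.mk truth_source_by_pid).get? pid with
    | none => true
    | some ts => ts.all (fun t => ((PySem.Dict.mk go_aspect).get? t).isSome))) = true)
  ∧ (truth_source_by_pid.map Prod.fst).Nodup
instance (output_pids : List String) (truth_source_by_pid : List (String × List String)) (go_aspect : List (String × String)) : Decidable (Pre_build_truth_rows_py output_pids truth_source_by_pid go_aspect) := by unfold Pre_build_truth_rows_py; infer_instance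

def pvWitness_build_truth_rows_py : List String × (List (String × List String)) × (List (String × String)) :=
  (["p1", "p2", "p1", "p3"], [("p1", ["g1", "g2"]), ("p2", [])], [("g1", "P"), ("g2", "F")])

def Spec_build_truth_rows_py (output_pids : List String) (truth_source_by_pid : List (String × List String)) (go_aspect : List (String × String)) (out : (List (String × String × String)) × List String) : Prop := out = build_truth_rows_py_alt output_pids truth_source_by_pid go_aspect
instance (output_pids : List String) (truth_source_by_pid : List (String × List String)) (go_aspect : List (String × String)) (out : (List (String × String × String)) × List String) : Decidable (Spec_build_truth_rows_py output_pids truth_source_by_pid go_aspect out) := by unfold Spec_build_truth_rows_py; infer_instance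

-- ===== CLAIM =====
def Claim_equal_build_truth_rows_py : Prop := ∀ (output_pids : List String) (truth_source_by_pid : List (String × List String)) (go_aspect : List (String × String)), Dom_build_truth_rows_py output_pids truth_source_by_pid go_aspect → Pre_build_truth_rows_py output_pids truth_source_by_pid go_aspect → Spec_build_truth_rows_py output_pids truth_source_by_pid go_aspect (build_truth_rows_py output_pids truth_source_by_pid go_aspect)

-- ===== LEMMAS AND PROOFS =====

-- _unique_in_order keeps seen = unique_values; its result is Python's dedup (first occurrences)
theorem pvUniq_diag (xs : List String) (s : PySem.Set String) :
    xs.foldl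
      (fun (st : PySem.Set String × List String) value =>
        if PySem.Set.contains st.1 value then st
        else (PySem.Set.add st.1 value, st.2 ++ [value]))
      (s, s) = (xs.foldl PySem.Set.add s, xs.foldl PySem.Set.add s) := by
  induction xs generalizing s with
  | nil => rfl
  | cons x xs ih =>
    rw [List.foldl_cons, List.foldl_cons]
    by_cases h : x ∈ s
    · have h1 : (if (s, s).1.contains x = true then ((s, s) : PySem.Set String × List String)
          else ((s, s).1.add x, (s, s).2 ++ [x])) = (s, s) := by
        simp [PySem.Set.contains, h]
      have h2 : s.add x = s := by simp [PySem.Set.add, PySem.Set.contains, h]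
      rw [h1, h2, ih]
    · have h1 : (if (s, s).1.contains x = true then ((s, s) : PySem.Set String × List String)
          else ((s, s).1.add x, (s, s).2 ++ [x])) = (s ++ [x], s ++ [x]) := by
        simp [PySem.Set.contains, PySem.Set.add, h]
      have h2 : s.add x = s ++ [x] := by simp [PySem.Set.add, PySem.Set.contains, h]
      rw [h1, h2, ih]

theorem pvUniq_eq_dedup (xs : List String) : pvUniqueInOrder xs = PySem.List.dedup xs := by
  unfold pvUniqueInOrder
  rw [show (PySem.Set.empty, ([] : List String)) =
      ((PySem.Set.empty : PySem.Set String), (PySem.Set.empty : PySem.Set String)) from rfl]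
  rw [pvUniq_diag]
  simp [PySem.List.dedup_eq_ofList, PySem.Set.ofList_eq_foldl, PySem.Set.empty]

-- the common per-pid specification: (rows, missing pids) contributed by each unique pid in order
def pvSpecPair (tsd : PySem.Dict String (List String)) (gad : PySem.Dict String String) :
    List String → List (String × String × String) × List String
  | [] => ([], [])
  | pid :: L =>
    let r := pvSpecPair tsd gad L
    match tsd.get? pid with
    | none => (r.1, pid :: r.2)
    | some ts =>
      if ts = [] then (r.1, pid :: r.2)
      else (ts.map (fun t => (pid, t, gad.getD t "")) ++ r.1, r.2)

-- A's inner loop when every term has an aspect: appends one row per term, set untouched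
theorem pvInnerA (gad : PySem.Dict String String) (pid : String) (ts : List String)
    (H : ∀ t ∈ ts, (gad.get? t).isSome) (rows : List (String × String × String)) (s : PySem.Set String) :
    ts.foldl
      (fun (st2 : List (String × String × String) × PySem.Set String) go_term =>
        match gad.get? go_term with
        | none => (st2.1, PySem.Set.add st2.2 go_term)
        | some aspect => (st2.1 ++ [(pid, go_term, aspect)], st2.2))
      (rows, s)
    = (rows ++ ts.map (fun t => (pid, t, gad.getD t "")), s) := by
  induction ts generalizing rows with
  | nil => simp
  | cons t ts ih =>
    obtain ⟨a, ha⟩ := Option.isSome_iff_exists.mp (H t (by simp))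
    simp only [List.foldl_cons, ha]
    rw [ih (fun u hu => H u (by simp [hu]))]
    simp [PySem.Dict.getD_eq_get?_getD, ha]

-- A's main fold computes the specification (under the no-missing-aspect hypothesis)
theorem pvSpecA (tsd : PySem.Dict String (List String)) (gad : PySem.Dict String String)
    (L : List String)
    (H : ∀ pid ∈ L, ∀ ts, tsd.get? pid = some ts → ∀ t ∈ ts, (gad.get? t).isSome)
    (rows0 : List (String × String × String)) (mp0 : List String) :
    L.foldl (pvStepA tsd gad) (rows0, PySem.Set.empty, mp0) =
      (rows0 ++ (pvSpecPair tsd gad L).1, PySem.Set.empty, mp0 ++ (pvSpecPair tsd gad L).2) := by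
  induction L generalizing rows0 mp0 with
  | nil => simp [pvSpecPair]
  | cons pid L ih =>
    have Htl : ∀ p ∈ L, ∀ ts, tsd.get? p = some ts → ∀ t ∈ ts, (gad.get? t).isSome :=
      fun p hp => H p (by simp [hp])
    simp only [List.foldl_cons, pvSpecPair]
    cases hg : tsd.get? pid with
    | none =>
      rw [show pvStepA tsd gad (rows0, PySem.Set.empty, mp0) pid
            = (rows0, PySem.Set.empty, mp0 ++ [pid]) by simp [pvStepA, hg],
          ih Htl rows0 (mp0 ++ [pid])]
      simp
    | some ts =>
      by_cases hts : ts = []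
      · rw [show pvStepA tsd gad (rows0, PySem.Set.empty, mp0) pid
              = (rows0, PySem.Set.empty, mp0 ++ [pid]) by simp [pvStepA, hg, hts],
            ih Htl rows0 (mp0 ++ [pid])]
        simp [hts]
      · have hA : pvStepA tsd gad (rows0, PySem.Set.empty, mp0) pid
            = (rows0 ++ ts.map (fun t => (pid, t, gad.getD t "")), PySem.Set.empty, mp0) := by
          simp only [pvStepA, hg, if_neg hts]
          rw [pvInnerA gad pid ts (H pid (by simp) ts hg)]
        rw [hA, ih Htl (rows0 ++ ts.map (fun t => (pid, t, gad.getD t ""))) mp0]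
        simp [hts]

-- the compiled-table fold never touches a key absent from the processed items
theorem pvFoldGetNone (gad : PySem.Dict String String)
    (l : List (String × List String))
    (d0 : PySem.Dict String (List (String × String × String) × List String)) (pid : String)
    (h : pid ∉ l.map Prod.fst) :
    (l.foldl (pvCompiledStep gad) d0).get? pid = d0.get? pid := by
  induction l generalizing d0 with
  | nil => rfl
  | cons p l ih =>
    have hne : pid ≠ p.1 := by
      intro he; exact h (by simp [he])
    rw [List.foldl_cons, ih _ (fun hm => h (by simp [hm]))]
    unfold pvCompiledStep
    split
    · rfl
    · exact PySem.Dict.get?_insert_of_ne d0 _ hne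

-- characterisation of the compiled table: lookup agrees with a first-match lookup in the
-- association list (keys unique by Pre_)
theorem pvCompiledGetAux (gad : PySem.Dict String String)
    (l : List (String × List String))
    (d0 : PySem.Dict String (List (String × String × String) × List String)) (pid : String)
    (hn : (l.map Prod.fst).Nodup) :
    (l.foldl (pvCompiledStep gad) d0).get? pid =
      match (PySem.Dict.mk l).get? pid with
      | none => d0.get? pid
      | some ts =>
        if ts = [] then d0.get? pid
        else some ((ts.filter (fun t => gad.contains t)).map (fun t => (pid, t, gad.getD t "")),
                   ts.filter (fun t => !(gad.contains t))) := by
  induction l generalizing d0 with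
  | nil => rfl
  | cons p l ih =>
    rw [List.foldl_cons, PySem.Dict.get?_mk_cons]
    by_cases he : p.1 = pid
    · have hnot : pid ∉ l.map Prod.fst := by
        simp only [List.map_cons, List.nodup_cons] at hn
        exact he ▸ hn.1
      rw [pvFoldGetNone gad l _ pid hnot]
      simp only [he, beq_self_eq_true, if_true]
      unfold pvCompiledStep
      by_cases hts : p.2 = []
      · simp [hts]
      · simp [hts, he, PySem.Dict.get?_insert_self]
    · have hbe : (p.1 == pid) = false := by simp [he]
      rw [hbe]
      simp only [List.map_cons, List.nodup_cons] at hn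
      rw [ih _ hn.2]
      have hpres : (pvCompiledStep gad d0 p).get? pid = d0.get? pid := by
        unfold pvCompiledStep
        split
        · rfl
        · exact PySem.Dict.get?_insert_of_ne d0 _ (fun h => he h.symm)
      simp only [Bool.false_eq_true, if_false]
      cases (PySem.Dict.mk l).get? pid with
      | none => exact hpres
      | some ts => by_cases hts : ts = [] <;> simp [hts, hpres]

-- B's assembly fold computes the same specification
theorem pvSpecB (tsd : PySem.Dict String (List String)) (gad : PySem.Dict String String)
    (compiled : PySem.Dict String (List (String × String × String) × List String))
    (hC : ∀ pid, compiled.get? pid =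
      match tsd.get? pid with
      | none => none
      | some ts =>
        if ts = [] then none
        else some ((ts.filter (fun t => gad.contains t)).map (fun t => (pid, t, gad.getD t "")),
                   ts.filter (fun t => !(gad.contains t))))
    (L : List String)
    (H : ∀ pid ∈ L, ∀ ts, tsd.get? pid = some ts → ∀ t ∈ ts, (gad.get? t).isSome)
    (rows0 : List (String × String × String)) (mp0 : List String) (s0 : PySem.Set String) :
    L.foldl (pvStepB compiled) (rows0, mp0, s0) =
      (rows0 ++ (pvSpecPair tsd gad L).1, mp0 ++ (pvSpecPair tsd gad L).2, s0) := by
  induction L generalizing rows0 mp0 with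
  | nil => simp [pvSpecPair]
  | cons pid L ih =>
    have Htl : ∀ p ∈ L, ∀ ts, tsd.get? p = some ts → ∀ t ∈ ts, (gad.get? t).isSome :=
      fun p hp => H p (by simp [hp])
    simp only [List.foldl_cons, pvSpecPair]
    cases hg : tsd.get? pid with
    | none =>
      have hB : pvStepB compiled (rows0, mp0, s0) pid = (rows0, mp0 ++ [pid], s0) := by
        simp [pvStepB, hC pid, hg]
      rw [hB, ih Htl rows0 (mp0 ++ [pid])]
      simp
    | some ts =>
      by_cases hts : ts = []
      · have hB : pvStepB compiled (rows0, mp0, s0) pid = (rows0, mp0 ++ [pid], s0) := by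
          simp [pvStepB, hC pid, hg, hts]
        rw [hB, ih Htl rows0 (mp0 ++ [pid])]
        simp [hts]
      · have hall : ∀ t ∈ ts, gad.contains t = true := by
          intro t ht
          rw [PySem.Dict.contains_eq_isSome_get?]
          exact H pid (by simp) ts hg t ht
        have hfilt : ts.filter (fun t => gad.contains t) = ts :=
          List.filter_eq_self.mpr (fun t ht => hall t ht)
        have hnone : ts.filter (fun t => !(gad.contains t)) = [] := by
          rw [List.filter_eq_nil_iff]
          intro t ht
          simp [hall t ht]
        have hB : pvStepB compiled (rows0, mp0, s0) pid =
            (rows0 ++ ts.map (fun t => (pid, t, gad.getD t "")), mp0, s0) := by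
          simp only [pvStepB, hC pid, hg, if_neg hts, hfilt, hnone]
          rfl
        rw [hB, ih Htl (rows0 ++ ts.map (fun t => (pid, t, gad.getD t ""))) mp0]
        simp [hts]

-- ===== VERDICT (by name: the statement is the Claim_ definition above) =====
theorem build_truth_rows_py_spec : Claim_equal_build_truth_rows_py := by
  intro output_pids tsb ga _ hpre
  obtain ⟨hpre1, hnd⟩ := hpre
  simp only [Spec_build_truth_rows_py, build_truth_rows_py, build_truth_rows_py_alt]
  have H : ∀ pid ∈ PySem.List.dedup output_pids, ∀ ts,
      (PySem.Dict.mk tsb).get? pid = some ts → ∀ t ∈ ts, ((PySem.Dict.mk ga).get? t).isSome := by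
    intro pid hpid ts hts t ht
    have hmem : pid ∈ output_pids := (PySem.List.mem_dedup _ _).mp hpid
    rw [List.all_eq_true] at hpre1
    have := hpre1 pid hmem
    rw [hts] at this
    simpa using (List.all_eq_true.mp (by simpa using this)) t ht
  have hC : ∀ pid, (pvCompiled (PySem.Dict.mk ga) (PySem.Dict.mk tsb)).get? pid =
      match (PySem.Dict.mk tsb).get? pid with
      | none => none
      | some ts =>
        if ts = [] then none
        else some ((ts.filter (fun t => (PySem.Dict.mk ga).contains t)).map
                     (fun t => (pid, t, (PySem.Dict.mk ga).getD t "")),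
                   ts.filter (fun t => !((PySem.Dict.mk ga).contains t))) := by
    intro pid
    have := pvCompiledGetAux (PySem.Dict.mk ga) tsb PySem.Dict.empty pid hnd
    unfold pvCompiled
    rw [show (PySem.Dict.mk tsb).items = tsb from rfl, this]
    cases (PySem.Dict.mk tsb).get? pid with
    | none => rfl
    | some ts => by_cases hts : ts = [] <;> simp [hts, PySem.Dict.get?_empty]
  rw [pvUniq_eq_dedup]
  rw [pvSpecA (PySem.Dict.mk tsb) (PySem.Dict.mk ga) (PySem.List.dedup output_pids) H [] []]
  rw [pvSpecB (PySem.Dict.mk tsb) (PySem.Dict.mk ga) _ hC (PySem.List.dedup output_pids) H [] [] PySem.Set.empty]
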